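-- pv_equiv track=rewrite | github.com/CIDARLAB/MIT-BroadFoundry | pool_dialout/bin/regex_from_seq.py | replace_N
-- ===== SOURCE A (Python) =====
-- def replace_N(seq, trim_end=True):
-- 	new_seq = ""
-- 	idx = 0
-- 	while idx < len(seq):
-- 		if seq[idx] in "ACGT":
-- 			new_seq += seq[idx]
-- 		else:
-- 			n_num = 1
-- 			while idx+1 < len(seq) and seq[idx+1] == "N":
-- 				n_num += 1
-- 				idx += 1
-- 			if trim_end == False or (trim_end == True and idx < len(seq)-1):
-- 				new_seq += "([ACGT]{" + str(n_num) + "})"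
-- 		idx += 1
-- 	return new_seq
-- ===== SOURCE B (Python) =====
-- import re
--
-- def replace_N(seq, trim_end=True):
--     out = []
--     for m in re.finditer(r'[ACGT]|[^ACGT]N*', seq):
--         t = m.group()
--         if len(t) == 1 and t in "ACGT":
--             out.append(t)
--         elif trim_end == False or (trim_end == True and m.end() != len(seq)):
--             out.append("([ACGT]{" + str(len(t)) + "})")
--     return "".join(out)
-- ===== Notes on version B (the rewrite author's own statement) =====
-- stated objective: faster
-- what changed: Replaces A's manual index cursor with inner N-counting while-loop and repeated string concatenation by a single regex pass (re.finditer over [ACGT]|[^ACGT]N*) that tokenizes the sequence, renders each token into a list, and joins once at the end.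
import Mathlib
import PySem

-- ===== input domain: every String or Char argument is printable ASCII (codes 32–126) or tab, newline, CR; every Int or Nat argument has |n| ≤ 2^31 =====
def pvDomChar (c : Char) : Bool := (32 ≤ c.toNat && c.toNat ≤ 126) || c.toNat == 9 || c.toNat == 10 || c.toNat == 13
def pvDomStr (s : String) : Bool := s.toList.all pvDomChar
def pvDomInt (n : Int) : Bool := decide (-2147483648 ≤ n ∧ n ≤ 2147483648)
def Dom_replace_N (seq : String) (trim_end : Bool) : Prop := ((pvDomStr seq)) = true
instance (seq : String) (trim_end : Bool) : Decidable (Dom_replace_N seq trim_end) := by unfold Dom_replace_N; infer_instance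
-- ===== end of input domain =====

-- B replaces A's manual index cursor and inner N-counting loop by a one-pass tokenizer
-- (regex [ACGT]|[^ACGT]N* in Python) whose tokens are rendered and joined into one list; objective: faster (avoids A's repeated string concatenation).

-- ===== PORT A =====
-- inner while loop of A: number of leading 'N' characters after the current one
def pvAcount : List Char → Nat
  | 'N' :: rest => pvAcount rest + 1
  | _ => 0

-- A's outer while loop; acc is new_seq, the cursor is the remaining character list
def pvAgo (trim_end : Bool) : List Char → List Char → List Char
  | [], acc => acc
  | c :: rest, acc =>
    if ['A','C','G','T'].contains c then
      pvAgo trim_end rest (acc ++ [c])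
    else
      if trim_end = false ∨ (trim_end = true ∧ rest.drop (pvAcount rest) ≠ []) then
        pvAgo trim_end (rest.drop (pvAcount rest))
          (acc ++ ("([ACGT]{".toList ++ (PySem.Int.toStr ((1 + pvAcount rest : Nat) : Int)).toList ++ "})".toList))
      else
        pvAgo trim_end (rest.drop (pvAcount rest)) acc
  termination_by cs _ => cs.length
  decreasing_by all_goals simp

def replace_N (seq : String) (trim_end : Bool) : String :=
  String.mk (pvAgo trim_end seq.toList [])

-- ===== PORT B =====
-- length of the greedy N* part of a run token
def pvNrun : List Char → Nat
  | 'N' :: rest => pvNrun rest + 1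
  | _ => 0

-- tokenizer: inl c = a single ACGT letter; inr (len, atEnd) = a run token [^ACGT]N*
-- of length len whose match.end() equals len(seq) iff atEnd
def pvTok : List Char → List (Char ⊕ (Nat × Bool))
  | [] => []
  | c :: rest =>
    if ['A','C','G','T'].contains c then
      Sum.inl c :: pvTok rest
    else
      Sum.inr (pvNrun rest + 1, (rest.drop (pvNrun rest)).isEmpty) :: pvTok (rest.drop (pvNrun rest))
  termination_by cs => cs.length
  decreasing_by all_goals simp

def pvRender (trim_end : Bool) : Char ⊕ (Nat × Bool) → List Char
  | Sum.inl c => [c]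
  | Sum.inr (len, atEnd) =>
    if trim_end = false ∨ (trim_end = true ∧ atEnd = false) then
      "([ACGT]{".toList ++ (PySem.Int.toStr (len : Int)).toList ++ "})".toList
    else []

def replace_N_alt (seq : String) (trim_end : Bool) : String :=
  String.mk (((pvTok seq.toList).map (pvRender trim_end)).flatten)

-- ===== PRECONDITION & SPEC =====
def Spec_replace_N (seq : String) (trim_end : Bool) (out : String) : Prop := out = replace_N_alt seq trim_end
instance (seq : String) (trim_end : Bool) (out : String) : Decidable (Spec_replace_N seq trim_end out) := by unfold Spec_replace_N; infer_instance

-- ===== CLAIM (what is proved, stated in full; the proofs are below) =====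
def Claim_equal_replace_N : Prop := ∀ (seq : String) (trim_end : Bool), Dom_replace_N seq trim_end → Spec_replace_N seq trim_end (replace_N seq trim_end)

-- ===== LEMMAS AND PROOFS =====
lemma pvAcount_eq_pvNrun (cs : List Char) : pvAcount cs = pvNrun cs := by
  induction cs with
  | nil => rfl
  | cons c rest ih =>
    by_cases h : c = 'N'
    · subst h; simp [pvAcount, pvNrun, ih]
    · rw [pvAcount.eq_def, pvNrun.eq_def]
      cases c; simp_all

lemma pvAgo_eq (trim : Bool) (cs acc : List Char) :
    pvAgo trim cs acc = acc ++ ((pvTok cs).map (pvRender trim)).flatten := by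
  induction cs, acc using pvAgo.induct trim with
  | case1 acc => simp [pvAgo, pvTok]
  | case2 c rest acc h ih =>
    rw [pvAgo, pvTok]
    simp only [if_pos h, ih, List.map_cons, List.flatten_cons, pvRender]
    simp [List.append_assoc]
  | case3 c rest acc h hc ih =>
    rw [pvAgo, pvTok]
    simp only [if_neg h]
    rw [if_pos hc, ih]
    simp only [List.map_cons, List.flatten_cons, pvRender, pvAcount_eq_pvNrun]
    rw [if_pos]
    · simp [Nat.add_comm, List.append_assoc]
    · rcases hc with hc | hc
      · exact Or.inl hc
      · refine Or.inr ⟨hc.1, ?_⟩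
        rw [pvAcount_eq_pvNrun] at hc
        cases hd : List.drop (pvNrun rest) rest with
        | nil => exact absurd hd hc.2
        | cons x xs => simp
  | case4 c rest acc h hc ih =>
    rw [pvAgo, pvTok]
    simp only [if_neg h]
    rw [if_neg hc, ih]
    simp only [List.map_cons, List.flatten_cons, pvRender, pvAcount_eq_pvNrun]
    rw [if_neg]
    · simp
    · intro hcon
      apply hc
      rcases hcon with h1 | h2
      · exact Or.inl h1
      · refine Or.inr ⟨h2.1, ?_⟩
        rw [pvAcount_eq_pvNrun]
        intro hnil
        rw [hnil] at h2
        simp at h2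

-- ===== VERDICT (by name: the statement is the Claim_ definition above) =====
theorem replace_N_spec : Claim_equal_replace_N := by
  intro seq trim _
  unfold Spec_replace_N replace_N replace_N_alt
  rw [pvAgo_eq]
  simp
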